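-- pv_equiv track=rewrite | github.com/eunsu-park/study-hub | examples/Algorithm/python/20_bitmask_dp.py | sos_dp
-- ===== SOURCE A (Python) =====
-- from typing import List, Tuple
--
-- def sos_dp(arr: List[int]) -> List[int]:
--     """
--     Sum over Subsets DP
--     Compute the sum of values for all subsets of each mask
--
--     result[mask] = sum(arr[subset]) for all subset of mask
--
--     Time Complexity: O(n * 2^n)
--     """
--     n = len(arr).bit_length()
--     dp = arr.copy()
--
--     # Extend to cover 0~(len(arr)-1)
--     while len(dp) < (1 << n):
--         dp.append(0)
--
--     for i in range(n):
--         for mask in range(1 << n):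
--             if mask & (1 << i):
--                 dp[mask] += dp[mask ^ (1 << i)]
--
--     return dp
-- ===== SOURCE B (Python) =====
-- def sos_dp(arr):
--     """Sum over subsets via recursive divide and conquer on the padded table."""
--     n = len(arr).bit_length()
--     ext = arr + [0] * ((1 << n) - len(arr))
--
--     def rec(v):
--         if len(v) <= 1:
--             return v[:]
--         h = len(v) // 2
--         lo = rec(v[:h])
--         hi = rec(v[h:])
--         return lo + [x + y for x, y in zip(lo, hi)]
--
--     return rec(ext)
-- ===== Notes on version B (the rewrite author's own statement) =====
-- stated objective: alternative
-- what changed: Replaces the layered in-place bit-by-bit DP (n passes over one flat table with per-index conditional updates) with a recursive divide-and-conquer that solves both halves of the zero-padded table and combines them as lo ++ (lo+hi); same asymptotics, but the combine works by bulk slicing/zip instead of per-index branchy updates, a constant-factor win.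
import Mathlib
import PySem

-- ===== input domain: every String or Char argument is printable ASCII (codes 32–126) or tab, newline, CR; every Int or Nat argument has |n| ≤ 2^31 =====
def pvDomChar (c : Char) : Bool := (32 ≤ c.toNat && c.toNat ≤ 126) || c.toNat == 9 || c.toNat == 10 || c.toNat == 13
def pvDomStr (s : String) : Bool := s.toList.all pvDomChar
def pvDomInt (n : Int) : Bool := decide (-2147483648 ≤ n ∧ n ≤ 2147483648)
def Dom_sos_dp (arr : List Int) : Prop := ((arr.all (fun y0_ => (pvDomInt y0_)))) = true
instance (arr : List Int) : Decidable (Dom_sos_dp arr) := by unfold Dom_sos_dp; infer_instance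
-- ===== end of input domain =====

-- B replaces A's layered in-place bit-by-bit DP with a recursive divide-and-conquer on the
-- zero-padded table (solve both halves, combine as lo ++ (lo+hi)); same asymptotic cost.
-- A does not mutate its argument (it works on a copy), so return-value equivalence is full equivalence.

-- ===== PORT A =====
-- 'while len(dp) < (1 << n): dp.append(0)'
def pvPad (dp : List Int) (target : Nat) : List Int :=
  if _h : dp.length < target then pvPad (dp ++ [0]) target else dp
  termination_by target - dp.length
  decreasing_by simp only [List.length_append, List.length_cons, List.length_nil]; omega

-- body of the inner 'for mask in range(1 << n)' loop
def pvInner (i : Nat) (dp2 : List Int) (mask : Nat) : List Int :=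
  if mask &&& (1 <<< i) ≠ 0 then
    dp2.set mask (dp2.getD mask 0 + dp2.getD (mask ^^^ (1 <<< i)) 0)
  else dp2

def sos_dp (arr : List Int) : List Int :=
  let n := Nat.size arr.length
  let dp0 := pvPad arr (1 <<< n)
  (List.range n).foldl (fun dp i => (List.range (1 <<< n)).foldl (pvInner i) dp) dp0

-- ===== PORT B =====
def pvRec (v : List Int) : List Int :=
  if _h : v.length ≤ 1 then v
  else
    let h := v.length / 2
    let lo := pvRec (v.take h)
    let hi := pvRec (v.drop h)
    lo ++ List.zipWith (· + ·) lo hi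
  termination_by v.length
  decreasing_by
  · simp only [List.length_take]; omega
  · simp only [List.length_drop]; omega

def sos_dp_alt (arr : List Int) : List Int :=
  let n := Nat.size arr.length
  pvRec (arr ++ List.replicate ((1 <<< n) - arr.length) 0)

-- ===== PRECONDITION & SPEC =====
def Spec_sos_dp (arr : List Int) (out : List Int) : Prop := out = sos_dp_alt arr
instance (arr : List Int) (out : List Int) : Decidable (Spec_sos_dp arr out) := by unfold Spec_sos_dp; infer_instance

-- ===== CLAIM (what is proved, stated in full; the proofs are below) =====
def Claim_equal_sos_dp : Prop := ∀ (arr : List Int), Dom_sos_dp arr → Spec_sos_dp arr (sos_dp arr)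

-- ===== LEMMAS AND PROOFS =====

-- the common specification: result[m] = sum of v[s] over all submasks s of m (s < N)
def pvSubsum (v : List Int) (N m : Nat) : Int :=
  ∑ s ∈ Finset.range N, if s &&& m = s then v.getD s 0 else 0

-- ---- generic bit lemmas ----

theorem pvHighBit {x k j : Nat} (hx : x < 2 ^ k) (hj : k ≤ j) : x.testBit j = false :=
  Nat.testBit_lt_two_pow (lt_of_lt_of_le hx (Nat.pow_le_pow_right (by norm_num) hj))

theorem pvAndSubsetIff (s m : Nat) :
    s &&& m = s ↔ ∀ j, s.testBit j = true → m.testBit j = true := by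
  constructor
  · intro h j hj
    have := congrArg (fun x => x.testBit j) h
    simpa [Nat.testBit_and, hj] using this
  · intro h
    apply Nat.eq_of_testBit_eq
    intro j
    cases hs : s.testBit j with
    | false => simp [Nat.testBit_and, hs]
    | true => simp [Nat.testBit_and, hs, h j hs]

theorem pvShiftEqIff (s m i : Nat) :
    s >>> i = m >>> i ↔ ∀ j, i ≤ j → s.testBit j = m.testBit j := by
  constructor
  · intro h j hj
    have := congrArg (fun x => x.testBit (j - i)) h
    simpa [Nat.testBit_shiftRight, Nat.add_sub_cancel' hj] using this
  · intro h
    apply Nat.eq_of_testBit_eq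
    intro j
    simp only [Nat.testBit_shiftRight]
    exact h (i + j) (Nat.le_add_right _ _)

theorem pvAddPowBit {x : Nat} (k : Nat) (hx : x < 2 ^ k) (j : Nat) :
    (2 ^ k + x).testBit j = (decide (k = j) || x.testBit j) := by
  have h := Nat.two_pow_add_eq_or_of_lt (i := k) hx 1
  simp only [Nat.mul_one] at h
  rw [h, Nat.testBit_or, Nat.testBit_two_pow]

-- ---- A side: characterize the DP ----

def pvStep (i : Nat) (f : Nat → Int) : Nat → Int :=
  fun m => if m.testBit i then f m + f (m ^^^ 2 ^ i) else f m

def pvModel (f : Nat → Int) : Nat → Nat → Int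
  | 0 => f
  | i + 1 => pvStep i (pvModel f i)

theorem pvMaskBit (k i : Nat) : (k &&& (1 <<< i) ≠ 0) ↔ k.testBit i = true := by
  rw [Nat.one_shiftLeft, Nat.and_two_pow]
  cases h : k.testBit i <;> simp

theorem pvPad_eq (dp : List Int) (t : Nat) :
    pvPad dp t = dp ++ List.replicate (t - dp.length) 0 := by
  fun_induction pvPad dp t with
  | case1 dp h ih =>
    rw [ih, show t - dp.length = (t - (dp.length + 1)) + 1 by omega, List.replicate_succ]
    simp
  | case2 dp h =>
    rw [show t - dp.length = 0 by omega]
    simp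

theorem pvInner_len (i : Nat) (ks : List Nat) (dp : List Int) :
    (ks.foldl (pvInner i) dp).length = dp.length := by
  induction ks generalizing dp with
  | nil => rfl
  | cons a l ih =>
    simp only [List.foldl_cons]
    rw [ih]
    unfold pvInner
    split <;> simp

theorem pvGetD_set (l : List Int) (k : Nat) (a : Int) (m : Nat) :
    (l.set k a).getD m 0 = if k = m ∧ k < l.length then a else l.getD m 0 := by
  simp only [List.getD_eq_getElem?_getD, List.getElem?_set]
  split_ifs with h1 h2 h3 h4 <;> simp_all <;> omega

theorem pvInner_spec (i n : Nat) (dp : List Int) (hlen : dp.length = 2 ^ n) :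
    ∀ k, k ≤ 2 ^ n → ∀ m,
    ((List.range k).foldl (pvInner i) dp).getD m 0 =
      if m < k ∧ m.testBit i then dp.getD m 0 + dp.getD (m ^^^ 2 ^ i) 0 else dp.getD m 0 := by
  intro k
  induction k with
  | zero => intro _ m; simp
  | succ k ih =>
    intro hk m
    have ihm := ih (by omega)
    rw [List.range_succ, List.foldl_append, List.foldl_cons, List.foldl_nil]
    have hcl : ((List.range k).foldl (pvInner i) dp).length = 2 ^ n := by
      rw [pvInner_len, hlen]
    by_cases hb : k.testBit i
    · -- the update branch
      rw [show pvInner i ((List.range k).foldl (pvInner i) dp) k =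
            ((List.range k).foldl (pvInner i) dp).set k
              (((List.range k).foldl (pvInner i) dp).getD k 0 +
               ((List.range k).foldl (pvInner i) dp).getD (k ^^^ (1 <<< i)) 0) by
            unfold pvInner; rw [if_pos ((pvMaskBit k i).mpr hb)]]
      rw [Nat.one_shiftLeft]
      have hxbit : (k ^^^ 2 ^ i).testBit i = false := by
        simp [Nat.testBit_xor, hb]
      rw [pvGetD_set]
      have hvk : ((List.range k).foldl (pvInner i) dp).getD k 0 = dp.getD k 0 := by
        rw [ihm k]; simp
      have hvx : ((List.range k).foldl (pvInner i) dp).getD (k ^^^ 2 ^ i) 0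
          = dp.getD (k ^^^ 2 ^ i) 0 := by
        rw [ihm (k ^^^ 2 ^ i)]; simp [hxbit]
      by_cases hm : k = m
      · subst hm
        rw [if_pos ⟨rfl, by omega⟩, hvk, hvx, if_pos ⟨by omega, hb⟩]
      · rw [if_neg (by tauto), ihm m]
        by_cases hbm : m.testBit i
        · by_cases hmk : m < k
          · rw [if_pos ⟨hmk, hbm⟩, if_pos ⟨by omega, hbm⟩]
          · rw [if_neg (by tauto), if_neg (by rintro ⟨h1, _⟩; omega)]
        · rw [if_neg (by tauto), if_neg (by tauto)]
    · rw [show pvInner i ((List.range k).foldl (pvInner i) dp) k =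
            (List.range k).foldl (pvInner i) dp by
            unfold pvInner; rw [if_neg (by simp [pvMaskBit, hb])]]
      rw [ihm m]
      by_cases hbm : m.testBit i
      · have hmk : m ≠ k := by rintro rfl; exact hb hbm
        by_cases hmlt : m < k
        · rw [if_pos ⟨hmlt, hbm⟩, if_pos ⟨by omega, hbm⟩]
        · rw [if_neg (by tauto), if_neg (by rintro ⟨h1, _⟩; omega)]
      · rw [if_neg (by tauto), if_neg (by tauto)]

theorem pvInner_full (i n : Nat) (_hi : i < n) (dp : List Int) (hlen : dp.length = 2 ^ n)
    (m : Nat) (hm : m < 2 ^ n) :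
    ((List.range (2 ^ n)).foldl (pvInner i) dp).getD m 0 =
      pvStep i (fun s => dp.getD s 0) m := by
  rw [pvInner_spec i n dp hlen (2 ^ n) le_rfl m]
  unfold pvStep
  by_cases hb : m.testBit i <;> simp [hb, hm]

theorem pvOuter (n : Nat) (dp0 : List Int) (hlen : dp0.length = 2 ^ n)
    (j : Nat) (hj : j ≤ n) :
    ((List.range j).foldl (fun dp i => (List.range (1 <<< n)).foldl (pvInner i) dp) dp0).length = 2 ^ n ∧
    ∀ m < 2 ^ n,
      ((List.range j).foldl (fun dp i => (List.range (1 <<< n)).foldl (pvInner i) dp) dp0).getD m 0 =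
        pvModel (fun s => dp0.getD s 0) j m := by
  simp only [Nat.one_shiftLeft]
  induction j with
  | zero => exact ⟨hlen, fun m _ => rfl⟩
  | succ j ih =>
    obtain ⟨ihl, ihv⟩ := ih (by omega)
    rw [List.range_succ, List.foldl_append, List.foldl_cons, List.foldl_nil]
    constructor
    · rw [pvInner_len, ihl]
    · intro m hm
      rw [pvInner_full j n (by omega) _ (by rw [ihl]) m hm]
      have hjn : 2 ^ j < 2 ^ n := Nat.pow_lt_pow_right (by norm_num) (by omega)
      have hx : m ^^^ 2 ^ j < 2 ^ n := Nat.xor_lt_two_pow hm hjn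
      show pvStep j _ m = pvStep j (pvModel (fun s => dp0.getD s 0) j) m
      unfold pvStep
      by_cases hb : m.testBit j <;> simp only [hb, if_true, ihv m hm, ihv _ hx]

-- ---- the math: the DP computes subset sums ----

theorem pvBitIffFalse {i s m : Nat} (hm : m.testBit i = false) :
    (s &&& m = s ∧ s >>> (i + 1) = m >>> (i + 1)) ↔ (s &&& m = s ∧ s >>> i = m >>> i) := by
  constructor
  · rintro ⟨h1, h2⟩
    refine ⟨h1, ?_⟩
    rw [pvShiftEqIff] at h2 ⊢
    intro j hj
    rcases eq_or_lt_of_le hj with h | h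
    · subst h
      cases hs : s.testBit i
      · rw [hm]
      · have := (pvAndSubsetIff s m).mp h1 i hs
        rw [hm] at this
        exact absurd this (by simp)
    · exact h2 j (by omega)
  · rintro ⟨h1, h2⟩
    refine ⟨h1, ?_⟩
    rw [pvShiftEqIff] at h2 ⊢
    intro j hj
    exact h2 j (by omega)

theorem pvBitIffTrue1 {i s m : Nat} (hm : m.testBit i = true) :
    (s &&& m = s ∧ s >>> (i + 1) = m >>> (i + 1) ∧ s.testBit i = true) ↔
      (s &&& m = s ∧ s >>> i = m >>> i) := by
  constructor
  · rintro ⟨h1, h2, h3⟩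
    refine ⟨h1, ?_⟩
    rw [pvShiftEqIff] at h2 ⊢
    intro j hj
    rcases eq_or_lt_of_le hj with h | h
    · subst h; rw [h3, hm]
    · exact h2 j (by omega)
  · rintro ⟨h1, h2⟩
    rw [pvShiftEqIff] at h2
    exact ⟨h1, by rw [pvShiftEqIff]; intro j hj; exact h2 j (by omega),
           by rw [h2 i le_rfl, hm]⟩

theorem pvBitIffTrue2 {i s m : Nat} (hm : m.testBit i = true) :
    (s &&& m = s ∧ s >>> (i + 1) = m >>> (i + 1) ∧ s.testBit i = false) ↔
      (s &&& (m ^^^ 2 ^ i) = s ∧ s >>> i = (m ^^^ 2 ^ i) >>> i) := by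
  have hbit : ∀ j, (m ^^^ 2 ^ i).testBit j = (m.testBit j ^^ decide (i = j)) := by
    intro j; rw [Nat.testBit_xor, Nat.testBit_two_pow]
  have hbi : (m ^^^ 2 ^ i).testBit i = false := by rw [hbit i, hm]; simp
  have hbj : ∀ j, j ≠ i → (m ^^^ 2 ^ i).testBit j = m.testBit j := by
    intro j hj; rw [hbit j]; simp [Ne.symm hj]
  constructor
  · rintro ⟨h1, h2, h3⟩
    constructor
    · rw [pvAndSubsetIff] at h1 ⊢
      intro j hj
      have hji : j ≠ i := by rintro rfl; rw [hj] at h3; exact absurd h3 (by simp)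
      rw [hbj j hji]; exact h1 j hj
    · rw [pvShiftEqIff] at h2 ⊢
      intro j hj
      rcases eq_or_lt_of_le hj with h | h
      · subst h; rw [h3, hbi]
      · rw [hbj j (by omega)]; exact h2 j (by omega)
  · rintro ⟨h1, h2⟩
    rw [pvShiftEqIff] at h2
    have h3 : s.testBit i = false := by rw [h2 i le_rfl, hbi]
    refine ⟨?_, ?_, h3⟩
    · rw [pvAndSubsetIff] at h1 ⊢
      intro j hj
      have hji : j ≠ i := by rintro rfl; rw [hj] at h3; exact absurd h3 (by simp)
      rw [← hbj j hji]; exact h1 j hj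
    · rw [pvShiftEqIff]
      intro j hj
      rw [← hbj j (by omega)]; exact h2 j (by omega)

theorem pvModel_sum (f : Nat → Int) (n : Nat) :
    ∀ i, i ≤ n → ∀ m, m < 2 ^ n →
    pvModel f i m =
      ∑ s ∈ Finset.range (2 ^ n), if s &&& m = s ∧ s >>> i = m >>> i then f s else 0 := by
  intro i
  induction i with
  | zero =>
    intro _ m hm
    have hcond : ∀ s, (s &&& m = s ∧ s >>> 0 = m >>> 0) ↔ s = m := by
      intro s
      simp only [Nat.shiftRight_zero]
      constructor
      · exact fun h => h.2
      · rintro rfl; exact ⟨Nat.and_self _, rfl⟩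
    rw [Finset.sum_congr rfl (fun s _ => if_congr (hcond s) rfl rfl),
        Finset.sum_ite_eq' (Finset.range (2 ^ n)) m f,
        if_pos (Finset.mem_range.mpr hm)]
    rfl
  | succ i ih =>
    intro hi m hm
    have hjn : 2 ^ i < 2 ^ n := Nat.pow_lt_pow_right (by norm_num) (by omega)
    show pvStep i (pvModel f i) m = _
    have hsplit : ∀ s : Nat,
        (if s &&& m = s ∧ s >>> (i + 1) = m >>> (i + 1) then f s else 0) =
        (if s &&& m = s ∧ s >>> (i + 1) = m >>> (i + 1) ∧ s.testBit i = true then f s else 0) +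
        (if s &&& m = s ∧ s >>> (i + 1) = m >>> (i + 1) ∧ s.testBit i = false then f s else 0) := by
      intro s
      by_cases h1 : s.testBit i <;>
        by_cases h2 : s &&& m = s ∧ s >>> (i + 1) = m >>> (i + 1) <;>
          simp [h1, h2]
    rw [Finset.sum_congr rfl (fun s _ => hsplit s), Finset.sum_add_distrib]
    unfold pvStep
    by_cases hb : m.testBit i
    · rw [if_pos hb,
          Finset.sum_congr rfl (fun s _ => if_congr (pvBitIffTrue1 hb) rfl rfl),
          Finset.sum_congr rfl (fun s _ => if_congr (pvBitIffTrue2 hb) rfl rfl),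
          ih (by omega) m hm, ih (by omega) (m ^^^ 2 ^ i) (Nat.xor_lt_two_pow hm hjn)]
    · rw [if_neg hb, ih (by omega) m hm]
      have hzero : ∀ s ∈ Finset.range (2 ^ n),
          (if s &&& m = s ∧ s >>> (i + 1) = m >>> (i + 1) ∧ s.testBit i = true then f s else 0) = 0 := by
        intro s _
        rw [if_neg]
        rintro ⟨h1, _, h3⟩
        have := (pvAndSubsetIff s m).mp h1 i h3
        simp [this] at hb
      rw [Finset.sum_congr rfl hzero, Finset.sum_const_zero, zero_add]
      apply Finset.sum_congr rfl
      intro s _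
      apply if_congr _ rfl rfl
      have hbf : m.testBit i = false := by simpa using hb
      constructor
      · rintro ⟨h1, h2⟩
        obtain ⟨h1', h2'⟩ := (pvBitIffFalse hbf).mpr ⟨h1, h2⟩
        refine ⟨h1', h2', ?_⟩
        cases hs : s.testBit i
        · rfl
        · have := (pvAndSubsetIff s m).mp h1 i hs
          rw [hbf] at this
          exact absurd this (by simp)
      · rintro ⟨h1, h2, _⟩; exact (pvBitIffFalse hbf).mp ⟨h1, h2⟩

theorem pvModel_subsum (v : List Int) (n : Nat) (m : Nat) (hm : m < 2 ^ n) :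
    pvModel (fun s => v.getD s 0) n m = pvSubsum v (2 ^ n) m := by
  rw [pvModel_sum _ n n le_rfl m hm]
  unfold pvSubsum
  apply Finset.sum_congr rfl
  intro s hs
  simp only [Finset.mem_range] at hs
  have h1 : s >>> n = 0 := by
    rw [Nat.shiftRight_eq_div_pow]; exact Nat.div_eq_of_lt hs
  have h2 : m >>> n = 0 := by
    rw [Nat.shiftRight_eq_div_pow]; exact Nat.div_eq_of_lt hm
  simp [h1, h2]

-- ---- B side: the recursion computes subset sums ----

theorem pvSubLow {k s m' : Nat} (hs : s < 2 ^ k) (hm' : m' < 2 ^ k) :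
    (s &&& (2 ^ k + m') = s) ↔ (s &&& m' = s) := by
  rw [pvAndSubsetIff, pvAndSubsetIff]
  constructor
  · intro h j hj
    have hjk : j < k := by
      by_contra hc
      rw [pvHighBit hs (by omega)] at hj
      exact absurd hj (by simp)
    have := h j hj
    rw [pvAddPowBit k hm'] at this
    simpa [show ¬ (k = j) by omega] using this
  · intro h j hj
    rw [pvAddPowBit k hm', h j hj]
    simp

theorem pvSubHigh {k s m' : Nat} (hs : s < 2 ^ k) (hm' : m' < 2 ^ k) :
    ((2 ^ k + s) &&& (2 ^ k + m') = 2 ^ k + s) ↔ (s &&& m' = s) := by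
  rw [pvAndSubsetIff, pvAndSubsetIff]
  constructor
  · intro h j hj
    have hjk : j < k := by
      by_contra hc
      rw [pvHighBit hs (by omega)] at hj
      exact absurd hj (by simp)
    have := h j (by rw [pvAddPowBit k hs, hj]; simp)
    rw [pvAddPowBit k hm'] at this
    simpa [show ¬ (k = j) by omega] using this
  · intro h j hj
    rw [pvAddPowBit k hs] at hj
    rw [pvAddPowBit k hm']
    by_cases hjk : k = j
    · simp [hjk]
    · simp only [hjk, decide_false, Bool.false_or] at hj ⊢
      exact h j hj

theorem pvGetD_zipAdd (lo hi : List Int) (m : Nat)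
    (h1 : m < lo.length) (h2 : m < hi.length) :
    (List.zipWith (· + ·) lo hi).getD m 0 = lo.getD m 0 + hi.getD m 0 := by
  have hz : m < (List.zipWith (· + ·) lo hi).length := by
    rw [List.length_zipWith]; omega
  rw [List.getD_eq_getElem _ _ hz, List.getElem_zipWith,
      List.getD_eq_getElem _ _ h1, List.getD_eq_getElem _ _ h2]

theorem pvGetD_take (v : List Int) (t s : Nat) (hs : s < t) (hv : t ≤ v.length) :
    (v.take t).getD s 0 = v.getD s 0 := by
  have h1 : s < (v.take t).length := by rw [List.length_take]; omega
  rw [List.getD_eq_getElem _ _ h1, List.getElem_take, List.getD_eq_getElem _ _ (by omega)]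

theorem pvGetD_drop (v : List Int) (t s : Nat) (hs : t + s < v.length) :
    (v.drop t).getD s 0 = v.getD (t + s) 0 := by
  have h1 : s < (v.drop t).length := by rw [List.length_drop]; omega
  rw [List.getD_eq_getElem _ _ h1, List.getElem_drop, List.getD_eq_getElem _ _ hs]

theorem pvRec_spec (k : Nat) (v : List Int) (hv : v.length = 2 ^ k) :
    (pvRec v).length = 2 ^ k ∧
    ∀ m < 2 ^ k, (pvRec v).getD m 0 = pvSubsum v (2 ^ k) m := by
  induction k generalizing v with
  | zero =>
    rw [pvRec]
    rw [dif_pos (by omega : v.length ≤ 1)]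
    refine ⟨hv, fun m hm => ?_⟩
    interval_cases m
    unfold pvSubsum
    rw [pow_zero, Finset.sum_range_one]
    simp
  | succ k ih =>
    have hp : (1:Nat) ≤ 2 ^ k := Nat.one_le_two_pow
    have he : (2:Nat) ^ (k + 1) = 2 ^ k + 2 ^ k := by rw [pow_succ]; omega
    have hgt : ¬ (v.length ≤ 1) := by omega
    rw [pvRec, dif_neg hgt]
    have hhalf : v.length / 2 = 2 ^ k := by omega
    rw [hhalf]
    have hlt : (v.take (2 ^ k)).length = 2 ^ k := by rw [List.length_take]; omega
    have hld : (v.drop (2 ^ k)).length = 2 ^ k := by rw [List.length_drop]; omega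
    obtain ⟨hlol, hlov⟩ := ih (v.take (2 ^ k)) hlt
    obtain ⟨hhil, hhiv⟩ := ih (v.drop (2 ^ k)) hld
    have hzl : (List.zipWith (· + ·) (pvRec (v.take (2 ^ k))) (pvRec (v.drop (2 ^ k)))).length
        = 2 ^ k := by rw [List.length_zipWith, hlol, hhil]; omega
    constructor
    · rw [List.length_append, hlol, hzl]; omega
    · intro m hm
      have hsum : ∀ m' : Nat, pvSubsum v (2 ^ (k + 1)) m' =
          (∑ s ∈ Finset.range (2 ^ k), if s &&& m' = s then v.getD s 0 else 0) +
          (∑ s ∈ Finset.range (2 ^ k),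
            if (2 ^ k + s) &&& m' = 2 ^ k + s then v.getD (2 ^ k + s) 0 else 0) := by
        intro m'
        unfold pvSubsum
        rw [he, Finset.sum_range_add]
      by_cases hml : m < 2 ^ k
      · rw [List.getD_append _ _ _ _ (by omega), hlov m hml, hsum m]
        have hz2 : ∀ s ∈ Finset.range (2 ^ k),
            (if (2 ^ k + s) &&& m = 2 ^ k + s then v.getD (2 ^ k + s) 0 else 0) = 0 := by
          intro s _
          rw [if_neg]
          intro hc
          have : (2 ^ k + s) &&& m ≤ m := Nat.and_le_right
          omega
        rw [Finset.sum_congr rfl hz2, Finset.sum_const_zero, add_zero]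
        unfold pvSubsum
        apply Finset.sum_congr rfl
        intro s hs
        simp only [Finset.mem_range] at hs
        rw [pvGetD_take v (2 ^ k) s hs (by omega)]
      · obtain ⟨m', rfl⟩ : ∃ m'', m = 2 ^ k + m'' := ⟨m - 2 ^ k, by omega⟩
        have hm' : m' < 2 ^ k := by omega
        rw [List.getD_append_right _ _ _ _ (by omega), hlol, Nat.add_sub_cancel_left,
            pvGetD_zipAdd _ _ _ (by omega) (by omega),
            hlov _ hm', hhiv _ hm', hsum (2 ^ k + m')]
        congr 1
        · unfold pvSubsum
          apply Finset.sum_congr rfl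
          intro s hs
          simp only [Finset.mem_range] at hs
          rw [pvGetD_take v (2 ^ k) s hs (by omega)]
          exact if_congr (pvSubLow hs hm').symm rfl rfl
        · unfold pvSubsum
          apply Finset.sum_congr rfl
          intro s hs
          simp only [Finset.mem_range] at hs
          rw [pvGetD_drop v (2 ^ k) s (by omega)]
          exact if_congr (pvSubHigh hs hm').symm rfl rfl

-- ===== VERDICT (by name: the statement is the Claim_ definition above) =====
theorem sos_dp_spec : Claim_equal_sos_dp := by
  intro arr _
  unfold Spec_sos_dp sos_dp sos_dp_alt
  simp only [Nat.one_shiftLeft]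
  have hlt : arr.length < 2 ^ Nat.size arr.length := Nat.lt_size_self _
  rw [pvPad_eq]
  have hvlen : (arr ++ List.replicate (2 ^ Nat.size arr.length - arr.length) 0).length
      = 2 ^ Nat.size arr.length := by
    rw [List.length_append, List.length_replicate]; omega
  obtain ⟨hAl, hAv⟩ := pvOuter (Nat.size arr.length) _ hvlen (Nat.size arr.length) le_rfl
  simp only [Nat.one_shiftLeft] at hAl hAv
  obtain ⟨hBl, hBv⟩ := pvRec_spec (Nat.size arr.length) _ hvlen
  apply List.ext_getElem (by rw [hAl, hBl])
  intro i h1 h2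
  have hi : i < 2 ^ Nat.size arr.length := by rw [hAl] at h1; exact h1
  rw [← List.getD_eq_getElem _ 0 h1, ← List.getD_eq_getElem _ 0 h2, hAv i hi, hBv i hi,
      pvModel_subsum _ (Nat.size arr.length) i hi]
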